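-- pv_equiv track=rewrite | github.com/gaopinghuang0/Citation-Classification-using-Deep-Learning | data.py | compute_word_to_idx
-- ===== SOURCE A (Python) =====
-- from collections import Counter
--
-- def compute_word_to_idx(sentences):
--     ctr = Counter()
--     for sent in sentences:
--         ctr += Counter(sent)
--     words_sorted = sorted(ctr, key=ctr.get, reverse=True)
--     word_to_idx = {word: i for i, word in enumerate(words_sorted, 1)}
--     word_to_idx['<PAD>'] = 0
--     return word_to_idx
-- ===== SOURCE B (Python) =====
-- def compute_word_to_idx(sentences):
--     counts = {}
--     for sent in sentences:
--         for w in sent: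
--             counts[w] = counts.get(w, 0) + 1
--     max_count = max(counts.values(), default=0)
--     buckets = {}
--     for w, c in counts.items():
--         buckets.setdefault(c, []).append(w)
--     word_to_idx = {}
--     idx = 1
--     for c in range(max_count, 0, -1):
--         for w in buckets.get(c, []):
--             word_to_idx[w] = idx
--             idx += 1
--     word_to_idx['<PAD>'] = 0
--     return word_to_idx
-- ===== Notes on version B (the rewrite author's own statement) =====
-- stated objective: alternative
-- what changed: B counts all words in one dict pass (instead of building and merging a Counter per sentence) and replaces the comparison sort by a counting/bucket walk over frequencies from max_count down to 1, preserving the first-appearance tie-break.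
import Mathlib
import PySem

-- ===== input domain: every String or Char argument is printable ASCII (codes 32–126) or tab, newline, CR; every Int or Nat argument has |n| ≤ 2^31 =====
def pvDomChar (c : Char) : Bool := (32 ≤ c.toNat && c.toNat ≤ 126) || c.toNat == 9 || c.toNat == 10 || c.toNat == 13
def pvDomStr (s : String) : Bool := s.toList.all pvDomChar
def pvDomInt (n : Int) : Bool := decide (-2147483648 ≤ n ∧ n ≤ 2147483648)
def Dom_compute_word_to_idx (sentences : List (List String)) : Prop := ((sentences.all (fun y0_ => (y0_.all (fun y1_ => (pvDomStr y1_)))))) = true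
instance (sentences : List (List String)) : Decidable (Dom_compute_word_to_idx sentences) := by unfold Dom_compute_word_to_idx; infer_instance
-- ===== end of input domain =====

-- B replaces A's repeated Counter merges + comparison sort by one counting pass and a
-- counting/bucket walk over frequencies (objective: alternative re-implementation).

-- ===== PORT A =====
-- 'ctr += Counter(sent)' (CPython Counter.__iadd__: for k, v in other.items(): self[k] = self.get(k, 0) + v;
-- all counts are positive, so the trailing _keep_positive sweep removes nothing)
def pvMerge (d : PySem.Dict String Int) (sent : List String) : PySem.Dict String Int :=
  (PySem.Dict.counter sent).items.foldl (fun d kv => d.insert kv.1 (d.getD kv.1 0 + kv.2)) d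

def compute_word_to_idx (sentences : List (List String)) : List (String × Int) :=
  let ctr := sentences.foldl pvMerge PySem.Dict.empty
  let words_sorted := PySem.List.sorted ctr.keys (fun w => ctr.getD w 0) true
  let word_to_idx := (PySem.List.enumerate words_sorted 1).foldl
      (fun d p => d.insert p.2 p.1) (PySem.Dict.empty : PySem.Dict String Int)
  (word_to_idx.insert "<PAD>" 0).items

-- ===== PORT B =====
def compute_word_to_idx_alt (sentences : List (List String)) : List (String × Int) :=
  let counts := sentences.foldl
      (fun d sent => sent.foldl (fun d w => d.insert w (d.getD w 0 + 1)) d)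
      (PySem.Dict.empty : PySem.Dict String Int)
  let max_count := PySem.List.maxD counts.values (fun c => c) 0
  -- 'buckets.setdefault(c, []).append(w)' stores buckets[c] = buckets.get(c, []) + [w]: Dict.modify
  let buckets := counts.items.foldl
      (fun (b : PySem.Dict Int (List String)) p => b.modify p.2 [] (fun l => l ++ [p.1]))
      PySem.Dict.empty
  let st := (PySem.List.pyRange max_count 0 (-1)).foldl
      (fun st c => (buckets.getD c []).foldl
        (fun (st : PySem.Dict String Int × Int) w => (st.1.insert w st.2, st.2 + 1)) st)
      ((PySem.Dict.empty : PySem.Dict String Int), 1)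
  (st.1.insert "<PAD>" 0).items

-- ===== PRECONDITION & SPEC =====
def Spec_compute_word_to_idx (sentences : List (List String)) (out : List (String × Int)) : Prop := out = compute_word_to_idx_alt sentences
instance (sentences : List (List String)) (out : List (String × Int)) : Decidable (Spec_compute_word_to_idx sentences out) := by unfold Spec_compute_word_to_idx; infer_instance

-- ===== CLAIM (what is proved, stated in full; the proofs are below) =====
def Claim_equal_compute_word_to_idx : Prop := ∀ (sentences : List (List String)), Dom_compute_word_to_idx sentences → Spec_compute_word_to_idx sentences (compute_word_to_idx sentences)

-- ===== LEMMAS AND PROOFS =====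

-- Set.update absorbs a dedup of its argument
lemma pv_mem_update {α : Type} [BEq α] [LawfulBEq α] (xs : List α) (s : PySem.Set α) (y : α) :
    y ∈ PySem.Set.update s xs ↔ y ∈ s ∨ y ∈ xs := by
  have := PySem.Set.mem_foldl_add xs (fun b => b) s y
  simpa [PySem.Set.update, ← PySem.Set.update_map_eq_foldl_add, eq_comm] using this

lemma pv_add_of_mem {α : Type} [BEq α] [LawfulBEq α] (s : PySem.Set α) (x : α) (h : x ∈ s) :
    PySem.Set.add s x = s := by
  simp [PySem.Set.add, h]

lemma pv_update_ofList {α : Type} [BEq α] [LawfulBEq α] (xs : List α) (s : PySem.Set α) :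
    PySem.Set.update s (PySem.Set.ofList xs) = PySem.Set.update s xs := by
  induction xs using List.reverseRecOn with
  | nil => rfl
  | append_singleton ys x ih =>
    have hof : PySem.Set.ofList (ys ++ [x]) = PySem.Set.add (PySem.Set.ofList ys) x := by
      simp [PySem.Set.ofList_eq_foldl, List.foldl_append]
    have hupd : PySem.Set.update s (ys ++ [x]) = PySem.Set.add (PySem.Set.update s ys) x := by
      simp [PySem.Set.update, List.foldl_append]
    by_cases hx : x ∈ PySem.Set.ofList ys
    · rw [hof, pv_add_of_mem _ _ hx, ih, hupd,
        pv_add_of_mem _ _ (by rw [pv_mem_update]; right; exact (PySem.Set.mem_ofList ys x).1 hx)]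
    · have hadd : PySem.Set.add (PySem.Set.ofList ys) x = PySem.Set.ofList ys ++ [x] := by
        simp [PySem.Set.add, hx]
      rw [hof, hupd, hadd, ← ih]
      simp [PySem.Set.update, List.foldl_append]

-- filtering a duplicate-free list for one element
lemma pv_filter_nodup {α : Type} [BEq α] [LawfulBEq α] (ks : List α) (hnd : ks.Nodup) (k : α) :
    ks.filter (fun j => j == k) = if k ∈ ks then [k] else [] := by
  induction ks with
  | nil => simp
  | cons j ks ih =>
    rcases List.nodup_cons.1 hnd with ⟨hj, hnd'⟩
    by_cases h : j = k
    · subst h; simp [ih hnd', hj]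
    · simp [h, ih hnd', Ne.symm h]

-- getD through a merge-style insert fold
lemma pv_getD_fold_insert_add (ks : List String) (v : String → Int) (d : PySem.Dict String Int) (k : String) :
    (ks.foldl (fun d j => d.insert j (d.getD j 0 + v j)) d).getD k 0
      = d.getD k 0 + ((ks.filter (fun j => j == k)).map v).sum := by
  induction ks generalizing d with
  | nil => simp
  | cons j ks ih =>
    rw [List.foldl_cons, ih]
    by_cases h : k = j
    · subst h; simp; ring
    · simp [PySem.Dict.getD_insert, h, Ne.symm h]

-- merging Counter(sent) into d is counting sent word by word into d
lemma pv_merge_eq (sent : List String) (d : PySem.Dict String Int) (hd : d.keys.Nodup) :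
    pvMerge d sent = sent.foldl (fun d w => d.insert w (d.getD w 0 + 1)) d := by
  have hfold : pvMerge d sent
      = (PySem.Set.ofList sent).foldl
          (fun d k => d.insert k (d.getD k 0 + (sent.count k : Int))) d := by
    rw [pvMerge, PySem.Dict.items_counter, List.foldl_map]
  apply PySem.Dict.ext
  have hkL : (pvMerge d sent).keys = PySem.Set.update d.keys sent := by
    rw [hfold, PySem.Dict.keys_foldl_insert (f := fun d k => d.getD k 0 + (sent.count k : Int)),
      pv_update_ofList]
  have hkR : (sent.foldl (fun d w => d.insert w (d.getD w 0 + 1)) d).keys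
      = PySem.Set.update d.keys sent := PySem.Dict.keys_foldl_insert _ _ _
  have hndL : (pvMerge d sent).keys.Nodup := by
    rw [hfold]; exact PySem.Dict.nodup_keys_foldl_insert _ _ _ hd
  have hndR : (sent.foldl (fun d w => d.insert w (d.getD w 0 + 1)) d).keys.Nodup :=
    PySem.Dict.nodup_keys_foldl_insert _ _ _ hd
  rw [PySem.Dict.items_eq_map_keys _ hndL 0, PySem.Dict.items_eq_map_keys _ hndR 0, hkL, hkR]
  apply List.map_congr_left
  intro k _
  have hL : (pvMerge d sent).getD k 0 = d.getD k 0 + (sent.count k : Int) := by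
    rw [hfold, pv_getD_fold_insert_add,
      pv_filter_nodup _ (PySem.Set.nodup_ofList sent) k]
    by_cases hk : k ∈ sent
    · simp [PySem.Set.mem_ofList, hk]
    · simp [PySem.Set.mem_ofList, hk, List.count_eq_zero_of_not_mem hk]
  rw [hL, PySem.Dict.getD_foldl_insert_add_one]

-- B's nested counting loop counts the flattened word stream
lemma pv_nested_eq (sentences : List (List String)) (d : PySem.Dict String Int) :
    sentences.foldl (fun d sent => sent.foldl (fun d w => d.insert w (d.getD w 0 + 1)) d) d
      = (sentences.flatMap id).foldl (fun d w => d.insert w (d.getD w 0 + 1)) d := by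
  induction sentences generalizing d with
  | nil => simp
  | cons s rest ih => simp [List.foldl_append, ih]

lemma pv_counts_eq (sentences : List (List String)) :
    sentences.foldl (fun d sent => sent.foldl (fun d w => d.insert w (d.getD w 0 + 1)) d)
        (PySem.Dict.empty : PySem.Dict String Int)
      = PySem.Dict.counter (sentences.flatMap id) := by
  rw [pv_nested_eq, PySem.Dict.foldl_insert_getD_add_one_eq_counter]

-- A's Counter-merge loop builds the same Counter
lemma pv_fold_merge (sentences : List (List String)) (d : PySem.Dict String Int) (hd : d.keys.Nodup) :
    sentences.foldl pvMerge d
      = sentences.foldl (fun d sent => sent.foldl (fun d w => d.insert w (d.getD w 0 + 1)) d) d := by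
  induction sentences generalizing d with
  | nil => rfl
  | cons s rest ih =>
    rw [List.foldl_cons, List.foldl_cons, pv_merge_eq s d hd,
      ih _ (PySem.Dict.nodup_keys_foldl_insert _ _ _ hd)]

lemma pv_ctrA_eq (sentences : List (List String)) :
    sentences.foldl pvMerge PySem.Dict.empty = PySem.Dict.counter (sentences.flatMap id) := by
  rw [pv_fold_merge _ _ (by simp), pv_counts_eq]

-- insertBy skips a prefix it does not go before …
lemma pv_insertBy_append {α : Type} (before : α → α → Bool) (x : α) (as bs : List α)
    (h : ∀ y ∈ as, before x y = false) :
    PySem.List.insertBy before x (as ++ bs) = as ++ PySem.List.insertBy before x bs := by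
  induction as with
  | nil => simp
  | cons a as ih =>
    have ha := h a (by simp)
    simp [PySem.List.insertBy, ha, ih (fun y hy => h y (by simp [hy]))]

-- … and lands in front of a suffix it goes before everywhere
lemma pv_insertBy_front {α : Type} (before : α → α → Bool) (x : α) (bs : List α)
    (h : ∀ y ∈ bs, before x y = true) :
    PySem.List.insertBy before x bs = x :: bs := by
  cases bs with
  | nil => simp [PySem.List.insertBy]
  | cons b bs => simp [PySem.List.insertBy, h b (by simp)]

-- split a countdown range at a value inside it
lemma pv_range_split (v hi : Int) (h0 : 0 < v) (h1 : v ≤ hi) :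
    PySem.List.pyRange hi 0 (-1)
      = PySem.List.pyRange hi v (-1) ++ v :: PySem.List.pyRange (v - 1) 0 (-1) := by
  rw [PySem.List.pyRange_neg_one_eq_reverse, PySem.List.pyRange_neg_one_eq_reverse,
    PySem.List.pyRange_neg_one_eq_reverse]
  have hsplit : PySem.List.pyRange (0+1) (hi+1) 1
      = PySem.List.pyRange (0+1) v 1 ++ PySem.List.pyRange v (hi+1) 1 :=
    PySem.List.pyRange_one_append _ _ _ (by omega) (by omega)
  have hcons : PySem.List.pyRange v (hi+1) 1 = v :: PySem.List.pyRange (v+1) (hi+1) 1 :=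
    PySem.List.pyRange_one_cons (by omega)
  rw [hsplit, hcons]
  simp [List.reverse_append]

-- THE CORE: Python's stable descending sort by an Int key in (0, hi] is the bucket walk
lemma pv_bucket_sorted {α : Type} (key : α → Int) (hi : Int) (xs : List α)
    (h : ∀ x ∈ xs, 0 < key x ∧ key x ≤ hi) :
    PySem.List.sorted xs key true
      = (PySem.List.pyRange hi 0 (-1)).flatMap (fun c => xs.filter (fun x => key x == c)) := by
  induction xs using List.reverseRecOn with
  | nil => rw [PySem.List.sorted_rev_eq_foldl_insertBy]; simp
  | append_singleton xs x ih =>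
    have hx := h x (by simp)
    have hxs : ∀ y ∈ xs, 0 < key y ∧ key y ≤ hi := fun y hy => h y (by simp [hy])
    rw [PySem.List.sorted_rev_eq_foldl_insertBy, List.foldl_append, List.foldl_cons,
      List.foldl_nil, ← PySem.List.sorted_rev_eq_foldl_insertBy, ih hxs]
    rw [pv_range_split (key x) hi hx.1 hx.2]
    rw [List.flatMap_append, List.flatMap_cons, List.flatMap_append, List.flatMap_cons]
    have hPr : (PySem.List.pyRange hi (key x) (-1)).flatMap
          (fun c => (xs ++ [x]).filter (fun z => key z == c))
        = (PySem.List.pyRange hi (key x) (-1)).flatMap (fun c => xs.filter (fun z => key z == c)) := by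
      apply List.flatMap_congr
      intro c hc
      have hc' := (PySem.List.mem_pyRange_neg_one).1 hc
      rw [List.filter_append]
      have : [x].filter (fun z => key z == c) = [] := by
        simp only [List.filter_cons, List.filter_nil, beq_iff_eq]
        have : ¬ key x = c := by omega
        simp [this]
      rw [this, List.append_nil]
    have hSr : (PySem.List.pyRange (key x - 1) 0 (-1)).flatMap
          (fun c => (xs ++ [x]).filter (fun z => key z == c))
        = (PySem.List.pyRange (key x - 1) 0 (-1)).flatMap (fun c => xs.filter (fun z => key z == c)) := by
      apply List.flatMap_congr
      intro c hc
      have hc' := (PySem.List.mem_pyRange_neg_one).1 hc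
      rw [List.filter_append]
      have : [x].filter (fun z => key z == c) = [] := by
        simp only [List.filter_cons, List.filter_nil, beq_iff_eq]
        have : ¬ key x = c := by omega
        simp [this]
      rw [this, List.append_nil]
    have hVr : (xs ++ [x]).filter (fun z => key z == key x)
        = xs.filter (fun z => key z == key x) ++ [x] := by
      rw [List.filter_append]
      congr 1
      simp [List.filter]
    rw [hPr, hSr, hVr]
    have hP : ∀ y ∈ (PySem.List.pyRange hi (key x) (-1)).flatMap
        (fun c => xs.filter (fun z => key z == c)) ++ xs.filter (fun z => key z == key x),
        (fun a b => decide (key b < key a)) x y = false := by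
      intro y hy
      simp only [decide_eq_false_iff_not, not_lt]
      rcases List.mem_append.1 hy with hy | hy
      · rcases List.mem_flatMap.1 hy with ⟨c, hc, hyc⟩
        have hc' := (PySem.List.mem_pyRange_neg_one).1 hc
        have hkey : key y = c := by
          have := (List.mem_filter.1 hyc).2; simpa using this
        omega
      · have hkey : key y = key x := by
          have := (List.mem_filter.1 hy).2; simpa using this
        omega
    have hS : ∀ y ∈ (PySem.List.pyRange (key x - 1) 0 (-1)).flatMap
        (fun c => xs.filter (fun z => key z == c)),
        (fun a b => decide (key b < key a)) x y = true := by
      intro y hy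
      simp only [decide_eq_true_eq]
      rcases List.mem_flatMap.1 hy with ⟨c, hc, hyc⟩
      have hc' := (PySem.List.mem_pyRange_neg_one).1 hc
      have hkey : key y = c := by
        have := (List.mem_filter.1 hyc).2; simpa using this
      omega
    rw [← List.append_assoc, pv_insertBy_append _ _ _ _ hP, pv_insertBy_front _ _ _ hS]
    simp

-- B's buckets: the words of one frequency, in counter order
lemma pv_buckets_getD (dct : PySem.Dict String Int) (hnd : dct.keys.Nodup) (c : Int) :
    (dct.items.foldl
        (fun (b : PySem.Dict Int (List String)) p => b.modify p.2 [] (fun l => l ++ [p.1]))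
        PySem.Dict.empty).getD c []
      = dct.keys.filter (fun k => dct.getD k 0 == c) := by
  have hsw : dct.items.foldl
        (fun (b : PySem.Dict Int (List String)) p => b.modify p.2 [] (fun l => l ++ [p.1]))
        PySem.Dict.empty
      = (dct.items.map Prod.swap).foldl
        (fun (b : PySem.Dict Int (List String)) p => b.modify p.1 [] (fun l => l ++ [p.2]))
        PySem.Dict.empty := by
    rw [List.foldl_map]
    simp only [Prod.fst_swap, Prod.snd_swap]
  rw [hsw, PySem.Dict.getD_foldl_modify_append, PySem.Dict.items_eq_map_keys dct hnd 0,
    List.map_map, List.filter_map, List.map_map]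
  simp [Function.comp_def]

-- the running-index write loop is the enumerate fold
lemma pv_enum_fold (ws : List String) (d : PySem.Dict String Int) (i : Int) :
    ws.foldl (fun (st : PySem.Dict String Int × Int) w => (st.1.insert w st.2, st.2 + 1)) (d, i)
      = ((PySem.List.enumerate ws i).foldl (fun d p => d.insert p.2 p.1) d, i + ws.length) := by
  induction ws generalizing d i with
  | nil => simp [PySem.List.enumerate]
  | cons w ws ih => simp [PySem.List.enumerate_cons, ih]; ring

-- max? of a nonempty list is some
lemma pv_max?_some (xs : List Int) (hne : xs ≠ []) :
    ∃ m, PySem.List.max? xs (fun c => c) = some m := by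
  cases xs with
  | nil => exact absurd rfl hne
  | cons a t =>
    clear hne
    show ∃ m, List.foldl _ (some a) t = some m
    induction t generalizing a with
    | nil => exact ⟨a, rfl⟩
    | cons b t ih =>
      simp only [List.foldl_cons]
      split <;> exact ih _

-- ===== VERDICT (by name: the statement is the Claim_ definition above) =====
theorem compute_word_to_idx_spec : Claim_equal_compute_word_to_idx := by
  intro sentences _
  show compute_word_to_idx sentences = compute_word_to_idx_alt sentences
  simp only [compute_word_to_idx, compute_word_to_idx_alt]
  rw [pv_ctrA_eq, pv_counts_eq]
  set C := PySem.Dict.counter (sentences.flatMap id) with hC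
  have hnd : C.keys.Nodup := PySem.Dict.nodup_keys_counter _
  set maxc := PySem.List.maxD C.values (fun c => c) 0 with hmaxc
  have hbound : ∀ k ∈ C.keys, 0 < C.getD k 0 ∧ C.getD k 0 ≤ maxc := by
    intro k hk
    constructor
    · rw [hC, PySem.Dict.getD_counter]
      have : k ∈ sentences.flatMap id := by
        have := hk
        rw [hC, PySem.Dict.keys_counter, PySem.Set.mem_ofList] at this
        exact this
      exact_mod_cast List.count_pos_iff.2 this
    · have hmem : C.getD k 0 ∈ C.values := by
        rw [PySem.Dict.values_eq_map_keys C hnd 0]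
        exact List.mem_map.2 ⟨k, hk, rfl⟩
      rcases pv_max?_some C.values (by intro h; rw [h] at hmem; simp at hmem) with ⟨m, hm⟩
      have := PySem.List.max?_isMax hm _ hmem
      rw [hmaxc]
      unfold PySem.List.maxD
      rw [hm]
      exact this
  rw [pv_bucket_sorted (fun w => C.getD w 0) maxc C.keys hbound]
  have hbk : ∀ c : Int,
      (C.items.foldl
        (fun (b : PySem.Dict Int (List String)) p => b.modify p.2 [] (fun l => l ++ [p.1]))
        PySem.Dict.empty).getD c []
      = C.keys.filter (fun k => C.getD k 0 == c) := pv_buckets_getD C hnd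
  simp only [hbk]
  rw [← List.foldl_flatMap, pv_enum_fold]
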